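-- pv_equiv track=rewrite | github.com/tungbachwork-crypto/TreeSearch | bfs.py | bfs
-- ===== SOURCE A (Python) =====
-- from collections import deque
--
-- def bfs(start_node, goal_nodes, graph):
--
--     # The frontier is a queue (FIFO) that stores:
--     # (current_node, path_from_start_to_that_node)
--     frontier = deque([(start_node, [start_node])])
--
--     # Explored set keeps track of visited nodes
--     explored = set()
--
--     # Count how many nodes have been created (start node counts as 1)
--     nodes_created = 1
--
--     # Continue searching while there are nodes to explore
--     while frontier:
--         # Remove the first node added (FIFO behavior)
--         current_node, path = frontier.popleft()
--
--         # Check if we have reached one of the goal nodes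
--         if current_node in goal_nodes:
--             path_string = " - ".join(path)
--             return (
--                 f"Goal Reached at: {current_node}\n"
--                 f"Nodes created: {nodes_created}\n"
--                 f"Path found: {path_string}"
--             )
--
--         # Only expand the node if it hasn't been visited before
--         if current_node not in explored:
--             explored.add(current_node)
--
--             # Get all neighbors of the current node
--             neighbors_dict = graph.get(current_node, {})
--             neighbor_ids = list(neighbors_dict.keys())
--
--             # Sort neighbors so that smaller node IDs are expanded first
--             # (this keeps the search order consistent)
--             neighbor_ids.sort(key=int)
--
--             for neighbor in neighbor_ids:
--                 # Add neighbor to frontier only if: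
--                 # - it has not been explored
--                 # - it is not already waiting in the frontier
--                 if (
--                     neighbor not in explored
--                     and neighbor not in [n for n, _ in frontier]
--                 ):
--                     # Create a new path including this neighbor
--                     new_path = path + [neighbor]
--
--                     # Add neighbor to the queue for future expansion
--                     frontier.append((neighbor, new_path))
--
--                     # Increase node creation counter
--                     nodes_created += 1
--
--     # If the queue becomes empty and no goal was found
--     return "No path found"
-- ===== SOURCE B (Python) =====
-- from collections import deque
--
-- def bfs(start_node, goal_nodes, graph):
--     # Parent-pointer BFS: the queue holds bare nodes; the path is reconstructed
--     # from parent links only when a goal is popped.  'enqueued' plays the role of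
--     # A's "explored or already waiting in the frontier" test (a node enters the
--     # queue at most once, so the two conditions coincide).
--     queue = deque([start_node])
--     parent = {}
--     enqueued = {start_node}
--     nodes_created = 1
--
--     while queue:
--         current = queue.popleft()
--         if current in goal_nodes:
--             path = [current]
--             node = current
--             while node != start_node:
--                 node = parent[node]
--                 path.append(node)
--             path.reverse()
--             return (
--                 f"Goal Reached at: {current}\n"
--                 f"Nodes created: {nodes_created}\n"
--                 f"Path found: {' - '.join(path)}"
--             )
--         for neighbor in sorted(graph.get(current, {}), key=int):
--             if neighbor not in enqueued:
--                 parent[neighbor] = current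
--                 enqueued.add(neighbor)
--                 queue.append(neighbor)
--                 nodes_created += 1
--
--     return "No path found"
-- ===== Notes on version B (the rewrite author's own statement) =====
-- stated objective: simpler
-- what changed: B enqueues bare nodes and records a parent pointer the first time each node is enqueued (with an 'enqueued' set replacing A's explored-set plus frontier scan), reconstructing the path from parent links only when a goal is popped, instead of carrying a copied path list in every queue entry.
import Mathlib
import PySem

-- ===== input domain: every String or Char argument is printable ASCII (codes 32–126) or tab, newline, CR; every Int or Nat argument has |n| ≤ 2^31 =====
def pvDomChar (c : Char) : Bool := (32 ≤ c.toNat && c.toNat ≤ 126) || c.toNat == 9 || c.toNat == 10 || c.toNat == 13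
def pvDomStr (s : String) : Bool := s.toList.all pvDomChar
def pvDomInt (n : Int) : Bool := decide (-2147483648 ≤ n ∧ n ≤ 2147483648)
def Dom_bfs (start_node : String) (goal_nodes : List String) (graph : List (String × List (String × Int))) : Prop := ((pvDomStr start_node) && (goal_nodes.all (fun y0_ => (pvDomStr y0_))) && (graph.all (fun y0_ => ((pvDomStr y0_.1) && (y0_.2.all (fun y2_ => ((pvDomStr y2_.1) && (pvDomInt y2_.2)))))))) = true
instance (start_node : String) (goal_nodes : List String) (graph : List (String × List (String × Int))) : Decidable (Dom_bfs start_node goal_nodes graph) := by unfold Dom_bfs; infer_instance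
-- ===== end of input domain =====

-- B replaces A's per-entry path lists with a parent-pointer dict and an 'enqueued'
-- set, reconstructing the path only when a goal is popped (objective: simpler).

-- ===== PORT A =====
-- helpers shared by both ports (both Pythons run the identical lines
-- 'sorted(graph.get(current, {}) keys, key=int)' and the identical f-string):
-- int(s) as the sort key; the default 0 is never taken under Pre_bfs (all keys parse)
def bfsKeyInt (s : String) : Int := (PySem.Int.ofStr? s).getD 0
-- list(graph.get(node, {}).keys()) sorted with key=int (graph is a dict of dicts)
def bfsAdj (graph : List (String × List (String × Int))) (node : String) : List String :=
  PySem.List.sorted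
    (PySem.Dict.keys
      (PySem.Dict.getD
        (PySem.Dict.ofList (graph.map (fun p => (p.1, PySem.Dict.ofList p.2)))) node
        PySem.Dict.empty))
    bfsKeyInt false
-- the common f-string "Goal Reached at: …\nNodes created: …\nPath found: …"
def bfsMsg (cur : String) (created : Int) (path : List String) : String :=
  "Goal Reached at: " ++ cur ++ "\nNodes created: " ++ PySem.Int.toStr created ++
    "\nPath found: " ++ PySem.Str.join " - " path
-- fuel bound for the while loops: every node is enqueued (hence popped) at most
-- once, and enqueues ≤ 1 + total number of adjacency entries; the 0-fuel branch
-- is a totality guard the Python loops never reach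
def bfsFuel (graph : List (String × List (String × Int))) : Nat :=
  2 + graph.foldl (fun n p => n + p.2.length) 0

-- the while loop of A: frontier of (node, path) pairs, explored set, counter
def bfsLoopA (start : String) (goals : List String)
    (graph : List (String × List (String × Int))) :
    Nat → List (String × List String) → PySem.Set String → Int → String
  | 0, _, _, _ => "No path found"
  | _ + 1, [], _, _ => "No path found"
  | f + 1, (cur, path) :: rest, explored, created =>
    if goals.contains cur then bfsMsg cur created path
    else if PySem.Set.contains explored cur then
      bfsLoopA start goals graph f rest explored created
    else
      let explored' := PySem.Set.add explored cur
      let st := (bfsAdj graph cur).foldl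
        (fun (st : List (String × List String) × Int) nb =>
          if !(PySem.Set.contains explored' nb) && !((st.1.map Prod.fst).contains nb)
          then (st.1 ++ [(nb, path ++ [nb])], st.2 + 1) else st)
        (rest, created)
      bfsLoopA start goals graph f st.1 explored' st.2

def bfs (start_node : String) (goal_nodes : List String)
    (graph : List (String × List (String × Int))) : String :=
  bfsLoopA start_node goal_nodes graph (bfsFuel graph)
    [(start_node, [start_node])] PySem.Set.empty 1

-- ===== PORT B =====
-- path reconstruction: path = [goal]; while node != start: node = parent[node];
-- path.append(node); then path.reverse() (the none branch = KeyError, unreachable: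
-- every enqueued non-start node has a parent entry)
def bfsRebuild (start : String) (parent : PySem.Dict String String) :
    Nat → String → List String → List String
  | 0, _, path => path.reverse
  | f + 1, node, path =>
    if node == start then path.reverse
    else
      match PySem.Dict.get? parent node with
      | some p => bfsRebuild start parent f p (path ++ [p])
      | none => path.reverse

-- the while loop of B: queue of bare nodes, parent dict, enqueued set, counter
def bfsLoopB (start : String) (goals : List String)
    (graph : List (String × List (String × Int))) :
    Nat → List String → PySem.Dict String String → PySem.Set String → Int → String
  | 0, _, _, _, _ => "No path found"
  | _ + 1, [], _, _, _ => "No path found"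
  | f + 1, cur :: rest, parent, enq, created =>
    if goals.contains cur then
      bfsMsg cur created
        (bfsRebuild start parent (PySem.Dict.size parent + 1) cur [cur])
    else
      let st := (bfsAdj graph cur).foldl
        (fun (st : List String × PySem.Dict String String × PySem.Set String × Int) nb =>
          if PySem.Set.contains st.2.2.1 nb then st
          else (st.1 ++ [nb], PySem.Dict.insert st.2.1 nb cur,
                PySem.Set.add st.2.2.1 nb, st.2.2.2 + 1))
        (rest, parent, enq, created)
      bfsLoopB start goals graph f st.1 st.2.1 st.2.2.1 st.2.2.2

def bfs_alt (start_node : String) (goal_nodes : List String)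
    (graph : List (String × List (String × Int))) : String :=
  bfsLoopB start_node goal_nodes graph (bfsFuel graph)
    [start_node] PySem.Dict.empty (PySem.Set.add PySem.Set.empty start_node) 1

-- ===== PRECONDITION & SPEC =====
-- the neighbour-id keys of graph.get(node, {}) (no sorting; Pre_-side helper)
def bfsPreAdjKeys (graph : List (String × List (String × Int))) (node : String) :
    List String :=
  PySem.Dict.keys
    (PySem.Dict.getD
      (PySem.Dict.ofList (graph.map (fun p => (p.1, PySem.Dict.ofList p.2)))) node
      PySem.Dict.empty)
-- the nodes reachable from start_node (bounded closure over the input graph;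
-- graph.length iterations suffice, interior nodes of a shortest chain are
-- distinct outer keys)
def bfsPreReach (graph : List (String × List (String × Int))) (start : String) :
    List String :=
  (fun s => PySem.Set.update s (s.flatMap (bfsPreAdjKeys graph)))^[graph.length] [start]
-- Both Pythons sort neighbour ids with key=int, which raises ValueError on a
-- non-int-parseable id when its node is expanded; Pre_bfs excludes graphs in
-- which any node reachable from start_node has such an id, a slight
-- over-approximation (expansion stops once a goal is popped), so some inputs on
-- which A still returns are excluded (see the cited example).
def Pre_bfs (start_node : String) (goal_nodes : List String)
    (graph : List (String × List (String × Int))) : Prop :=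
  ((bfsPreReach graph start_node).all
    (fun n => (bfsPreAdjKeys graph n).all (fun k => (PySem.Int.ofStr? k).isSome))) = true
instance (start_node : String) (goal_nodes : List String) (graph : List (String × List (String × Int))) : Decidable (Pre_bfs start_node goal_nodes graph) := by unfold Pre_bfs; infer_instance

def pvWitness_bfs : String × List String × (List (String × List (String × Int))) :=
  ("1", ["2"], [("1", [("2", 5)]), ("2", [])])

def Spec_bfs (start_node : String) (goal_nodes : List String) (graph : List (String × List (String × Int))) (out : String) : Prop := out = bfs_alt start_node goal_nodes graph
instance (start_node : String) (goal_nodes : List String) (graph : List (String × List (String × Int))) (out : String) : Decidable (Spec_bfs start_node goal_nodes graph out) := by unfold Spec_bfs; infer_instance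

-- ===== CLAIM (what is proved, stated in full; the proofs are below) =====
def Claim_equal_bfs : Prop := ∀ (start_node : String) (goal_nodes : List String) (graph : List (String × List (String × Int))), Dom_bfs start_node goal_nodes graph → Pre_bfs start_node goal_nodes graph → Spec_bfs start_node goal_nodes graph (bfs start_node goal_nodes graph)

-- ===== LEMMAS AND PROOFS =====

-- the simulation invariant between A's state and B's state
def bfsInv (start : String) (explored : List String)
    (fr : List (String × List String)) (q : List String)
    (parent : PySem.Dict String String) (enq : List String) : Prop :=
  q = fr.map Prod.fst ∧
  q.Nodup ∧
  (∀ x, x ∈ enq ↔ x ∈ explored ∨ x ∈ q) ∧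
  start ∈ enq ∧
  (∀ k v, PySem.Dict.get? parent k = some v → k ∈ enq ∧ v ∈ enq) ∧
  (∀ pr ∈ fr, pr.1 ∉ explored ∧ pr.2.length ≤ PySem.Dict.size parent + 1 ∧
    ∀ f, pr.2.length ≤ f → bfsRebuild start parent f pr.1 [pr.1] = pr.2)

theorem bfsRebuild_append (s : String) (d : PySem.Dict String String) :
    ∀ (f : Nat) (n : String) (xs ys : List String),
      bfsRebuild s d f n (xs ++ ys) = bfsRebuild s d f n ys ++ xs.reverse := by
  intro f
  induction f with
  | zero => intro n xs ys; simp [bfsRebuild]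
  | succ f ih =>
    intro n xs ys
    by_cases h : (n == s) = true
    · simp [bfsRebuild, h]
    · simp only [bfsRebuild, h, Bool.false_eq_true, if_false]
      cases hg : PySem.Dict.get? d n with
      | none => simp
      | some p =>
        have := ih p (xs) (ys ++ [p])
        simpa [List.append_assoc] using this

theorem bfsRebuild_insert_fresh (s : String) (d : PySem.Dict String String)
    (enq : List String) (nb w : String)
    (hvals : ∀ k v, PySem.Dict.get? d k = some v → v ∈ enq) (hnb : nb ∉ enq) :
    ∀ (f : Nat) (n : String) (acc : List String), n ∈ enq →
      bfsRebuild s (PySem.Dict.insert d nb w) f n acc = bfsRebuild s d f n acc := by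
  intro f
  induction f with
  | zero => intro n acc _; rfl
  | succ f ih =>
    intro n acc hn
    by_cases h : (n == s) = true
    · simp [bfsRebuild, h]
    · have hne : n ≠ nb := fun he => hnb (he ▸ hn)
      simp only [bfsRebuild, h, Bool.false_eq_true, if_false,
        PySem.Dict.get?_insert_of_ne d w hne]
      cases hg : PySem.Dict.get? d n with
      | none => rfl
      | some p => exact ih p (acc ++ [p]) ((hvals n p hg))


-- one step of the expansion loop preserves the invariant
theorem bfs_fold_eq (start : String) (explored' : List String)
    (cur : String) (path : List String) :
    ∀ (ids : List String) (fr : List (String × List String)) (q : List String)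
      (parent : PySem.Dict String String) (enq : List String) (created : Int),
      bfsInv start explored' fr q parent enq →
      cur ∈ enq →
      path.length ≤ PySem.Dict.size parent + 1 →
      (∀ f, path.length ≤ f → bfsRebuild start parent f cur [cur] = path) →
      bfsInv start explored'
        (ids.foldl (fun (st : List (String × List String) × Int) nb =>
          if !(PySem.Set.contains explored' nb) && !((st.1.map Prod.fst).contains nb)
          then (st.1 ++ [(nb, path ++ [nb])], st.2 + 1) else st) (fr, created)).1
        (ids.foldl (fun (st : List String × PySem.Dict String String × PySem.Set String × Int) nb =>
          if PySem.Set.contains st.2.2.1 nb then st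
          else (st.1 ++ [nb], PySem.Dict.insert st.2.1 nb cur,
                PySem.Set.add st.2.2.1 nb, st.2.2.2 + 1)) (q, parent, enq, created)).1
        (ids.foldl (fun (st : List String × PySem.Dict String String × PySem.Set String × Int) nb =>
          if PySem.Set.contains st.2.2.1 nb then st
          else (st.1 ++ [nb], PySem.Dict.insert st.2.1 nb cur,
                PySem.Set.add st.2.2.1 nb, st.2.2.2 + 1)) (q, parent, enq, created)).2.1
        (ids.foldl (fun (st : List String × PySem.Dict String String × PySem.Set String × Int) nb =>
          if PySem.Set.contains st.2.2.1 nb then st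
          else (st.1 ++ [nb], PySem.Dict.insert st.2.1 nb cur,
                PySem.Set.add st.2.2.1 nb, st.2.2.2 + 1)) (q, parent, enq, created)).2.2.1 ∧
      (ids.foldl (fun (st : List String × PySem.Dict String String × PySem.Set String × Int) nb =>
          if PySem.Set.contains st.2.2.1 nb then st
          else (st.1 ++ [nb], PySem.Dict.insert st.2.1 nb cur,
                PySem.Set.add st.2.2.1 nb, st.2.2.2 + 1)) (q, parent, enq, created)).2.2.2 =
      (ids.foldl (fun (st : List (String × List String) × Int) nb =>
          if !(PySem.Set.contains explored' nb) && !((st.1.map Prod.fst).contains nb)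
          then (st.1 ++ [(nb, path ++ [nb])], st.2 + 1) else st) (fr, created)).2 := by
  intro ids
  induction ids with
  | nil => intro fr q parent enq created hinv _ _ _; exact ⟨hinv, rfl⟩
  | cons nb ids ih =>
    intro fr q parent enq created hinv hcur hlen hreb
    obtain ⟨hq, hnd, henq, hst, hpar, hfr⟩ := hinv
    by_cases hb : nb ∈ enq
    · -- B skips; A's guard is false too
      have hbB : PySem.Set.contains enq nb = true := (PySem.Set.contains_iff _ _).mpr hb
      have hbA : (!(PySem.Set.contains explored' nb) && !((fr.map Prod.fst).contains nb)) = false := by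
        rcases (henq nb).1 hb with hx | hx
        · have h1 : PySem.Set.contains explored' nb = true := (PySem.Set.contains_iff _ _).mpr hx
          simp only [h1, Bool.not_true, Bool.false_and]
        · have h2 : (fr.map Prod.fst).contains nb = true := by
            rw [List.contains_iff_mem, ← hq]; exact hx
          simp only [h2, Bool.not_true, Bool.and_false]
      simp only [List.foldl_cons, hbB, if_true, hbA, Bool.false_eq_true, if_false]
      exact ih fr q parent enq created ⟨hq, hnd, henq, hst, hpar, hfr⟩ hcur hlen hreb
    · -- enqueue nb on both sides
      have hbB : PySem.Set.contains enq nb = false :=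
        Bool.eq_false_iff.mpr (fun h => hb ((PySem.Set.contains_iff _ _).mp h))
      have hnex : nb ∉ explored' := fun hx => hb ((henq nb).2 (Or.inl hx))
      have hnq : nb ∉ q := fun hx => hb ((henq nb).2 (Or.inr hx))
      have hbA : (!(PySem.Set.contains explored' nb) && !((fr.map Prod.fst).contains nb)) = true := by
        have h1 : PySem.Set.contains explored' nb = false :=
          Bool.eq_false_iff.mpr (fun h => hnex ((PySem.Set.contains_iff _ _).mp h))
        have h2 : (fr.map Prod.fst).contains nb = false := by
          rw [Bool.eq_false_iff]
          intro hcont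
          exact hnq (by rw [hq]; exact List.contains_iff_mem.mp hcont)
        simp only [h1, h2, Bool.not_false, Bool.and_self]
      have hncont : PySem.Dict.contains parent nb = false := by
        rw [PySem.Dict.contains_eq_isSome_get?]
        cases hg : PySem.Dict.get? parent nb with
        | none => rfl
        | some v => exact absurd ((hpar nb v hg).1) hb
      have hsize : PySem.Dict.size (PySem.Dict.insert parent nb cur) =
          PySem.Dict.size parent + 1 := by
        simp [PySem.Dict.size_insert, hncont]
      have hvals : ∀ k v, PySem.Dict.get? parent k = some v → v ∈ enq :=
        fun k v hg => (hpar k v hg).2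
      have hstab : ∀ (f : Nat) (n : String) (acc : List String), n ∈ enq →
          bfsRebuild start (PySem.Dict.insert parent nb cur) f n acc =
          bfsRebuild start parent f n acc :=
        bfsRebuild_insert_fresh start parent enq nb cur hvals hb
      have hnbs : nb ≠ start := fun he => hb (he ▸ hst)
      simp only [List.foldl_cons, hbB, Bool.false_eq_true, if_false, hbA, if_true]
      apply ih
      · -- the invariant for the extended state
        refine ⟨by simp [hq], ?_, ?_, (PySem.Set.mem_add _ _ _).mpr (Or.inl hst), ?_, ?_⟩
        · exact List.Nodup.append hnd (List.nodup_singleton nb)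
            (by simpa [List.disjoint_singleton] using hnq)
        · intro x
          constructor
          · intro hx
            rcases (PySem.Set.mem_add _ _ _).mp hx with hx | hx
            · rcases (henq x).1 hx with h | h
              · exact Or.inl h
              · exact Or.inr (by simp [h])
            · exact Or.inr (by simp [hx])
          · intro hx
            rcases hx with h | h
            · exact (PySem.Set.mem_add _ _ _).mpr (Or.inl ((henq x).2 (Or.inl h)))
            · rcases List.mem_append.mp h with h | h
              · exact (PySem.Set.mem_add _ _ _).mpr (Or.inl ((henq x).2 (Or.inr h)))
              · exact (PySem.Set.mem_add _ _ _).mpr (Or.inr (by simpa using h))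
        · intro k v hg
          rw [PySem.Dict.get?_insert] at hg
          by_cases hk : k = nb
          · subst hk
            simp at hg
            subst hg
            exact ⟨(PySem.Set.mem_add _ _ _).mpr (Or.inr rfl),
              (PySem.Set.mem_add _ _ _).mpr (Or.inl hcur)⟩
          · rw [if_neg hk] at hg
            obtain ⟨h1, h2⟩ := hpar k v hg
            exact ⟨(PySem.Set.mem_add _ _ _).mpr (Or.inl h1), (PySem.Set.mem_add _ _ _).mpr (Or.inl h2)⟩
        · intro pr hpr
          rcases List.mem_append.mp hpr with hpr | hpr
          · obtain ⟨h1, h2, h3⟩ := hfr pr hpr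
            refine ⟨h1, by omega, fun f hf => ?_⟩
            rw [hstab f pr.1 [pr.1] ((henq pr.1).2 (Or.inr (by
              rw [hq]; exact List.mem_map.mpr ⟨pr, hpr, rfl⟩)))]
            exact h3 f hf
          · simp only [List.mem_singleton] at hpr
            subst hpr
            refine ⟨hnex, by simp; omega, fun f hf => ?_⟩
            simp only [List.length_append, List.length_singleton] at hf
            obtain ⟨f', rfl⟩ : ∃ f', f = f' + 1 := ⟨f - 1, by omega⟩
            have hne : (nb == start) = false := by simpa using hnbs
            simp only [bfsRebuild, hne, Bool.false_eq_true, if_false,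
              PySem.Dict.get?_insert_self]
            rw [bfsRebuild_append, hstab f' cur [cur] hcur, hreb f' (by omega)]
            simp
      · exact (PySem.Set.mem_add _ _ _).mpr (Or.inl hcur)
      · rw [hsize]; omega
      · intro f hf
        rw [hstab f cur [cur] hcur]
        exact hreb f hf

theorem bfs_loop_eq (start : String) (goals : List String)
    (graph : List (String × List (String × Int))) :
    ∀ (f : Nat) (fr : List (String × List String)) (q : List String)
      (parent : PySem.Dict String String) (enq : List String)
      (explored : List String) (created : Int),
      bfsInv start explored fr q parent enq →
      bfsLoopA start goals graph f fr explored created =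
        bfsLoopB start goals graph f q parent enq created := by
  intro f
  induction f with
  | zero => intro fr q parent enq explored created _; rfl
  | succ f ih =>
    intro fr q parent enq explored created hinv
    obtain ⟨hq, hnd, henq, hst, hpar, hfr⟩ := hinv
    subst hq
    cases fr with
    | nil => rfl
    | cons pr rest =>
      obtain ⟨cur, path⟩ := pr
      obtain ⟨hne, hlen, hreb⟩ := hfr (cur, path) (List.mem_cons_self)
      simp only [List.map_cons, bfsLoopA, bfsLoopB]
      by_cases hg : goals.contains cur = true
      · rw [if_pos hg, if_pos hg, hreb _ hlen]
      · rw [if_neg hg, if_neg hg]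
        have hnc : PySem.Set.contains explored cur = false :=
          Bool.eq_false_iff.mpr (fun h => hne ((PySem.Set.contains_iff _ _).mp h))
        rw [if_neg (fun h => hne ((PySem.Set.contains_iff _ _).mp h))]
        have hcur : cur ∈ enq := (henq cur).2 (Or.inr (by simp))
        have hinner : bfsInv start (PySem.Set.add explored cur) rest (rest.map Prod.fst)
            parent enq := by
          refine ⟨rfl, (List.nodup_cons.mp hnd).2, ?_, hst, hpar, ?_⟩
          · intro x
            rw [henq x]
            constructor
            · rintro (h | h)
              · exact Or.inl ((PySem.Set.mem_add _ _ _).mpr (Or.inl h))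
              · rcases List.mem_cons.mp h with h | h
                · exact Or.inl ((PySem.Set.mem_add _ _ _).mpr (Or.inr h))
                · exact Or.inr h
            · rintro (h | h)
              · rcases (PySem.Set.mem_add _ _ _).mp h with h | h
                · exact Or.inl h
                · exact Or.inr (by simp [h])
              · exact Or.inr (List.mem_cons_of_mem _ h)
          · intro pr hpr
            obtain ⟨h1, h2, h3⟩ := hfr pr (List.mem_cons_of_mem _ hpr)
            refine ⟨fun hx => ?_, h2, h3⟩
            rcases (PySem.Set.mem_add _ _ _).mp hx with h | h
            · exact h1 h
            · exact (List.nodup_cons.mp hnd).1 (List.mem_map.mpr ⟨pr, hpr, h⟩)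
        obtain ⟨hinv', hcnt⟩ := bfs_fold_eq start (PySem.Set.add explored cur) cur path
          (bfsAdj graph cur) rest (rest.map Prod.fst) parent enq created
          hinner hcur hlen hreb
        rw [ih _ _ _ _ _ _ hinv', hcnt]

-- ===== VERDICT (by name: the statement is the Claim_ definition above) =====
theorem bfs_spec : Claim_equal_bfs := by
  intro start goals graph _ _
  unfold Spec_bfs bfs bfs_alt
  apply bfs_loop_eq
  refine ⟨rfl, List.nodup_singleton _, ?_, (PySem.Set.mem_add _ _ _).mpr (Or.inr rfl), ?_, ?_⟩
  · intro x
    constructor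
    · intro hx
      rcases (PySem.Set.mem_add _ _ _).mp hx with h | h
      · cases h
      · exact Or.inr (by simp [h])
    · rintro (h | h)
      · cases h
      · exact (PySem.Set.mem_add _ _ _).mpr (Or.inr (by simpa using h))
  · intro k v hg
    rw [PySem.Dict.get?_empty] at hg
    cases hg
  · intro pr hpr
    simp only [List.mem_singleton] at hpr
    subst hpr
    refine ⟨List.not_mem_nil, Nat.succ_le_succ (Nat.zero_le _), ?_⟩
    intro f hf
    obtain ⟨f', rfl⟩ : ∃ f', f = f' + 1 := ⟨f - 1, by simp at hf; omega⟩
    simp [bfsRebuild]
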